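-- pv_equiv track=rewrite | github.com/depeter/tripflow | backend/scripts/migrate_scraparr_events.py | map_event_category
-- ===== SOURCE A (Python) =====
-- def map_event_category(event_type, themes):
--     """
--     Map source event_type and themes to our EventCategory enum.
--
--     EventCategory options:
--     - festival, concert, sports, market, exhibition, theater, cultural, food, outdoor, other
--     """
--     if not event_type:
--         event_type = ""
--
--     event_type_lower = event_type.lower()
--     themes_lower = [t.lower() for t in (themes or [])]
--
--     # Direct mappings
--     if 'festival' in event_type_lower or 'festival' in themes_lower:
--         return 'festival'
--     if 'concert' in event_type_lower or 'muziek' in themes_lower or 'music' in themes_lower: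
--         return 'concert'
--     if 'sport' in event_type_lower or 'sport' in themes_lower:
--         return 'sports'
--     if 'markt' in event_type_lower or 'market' in event_type_lower:
--         return 'market'
--     if 'tentoonstelling' in event_type_lower or 'exhibition' in event_type_lower or 'expo' in event_type_lower:
--         return 'exhibition'
--     if 'theater' in event_type_lower or 'theatre' in event_type_lower or 'voorstelling' in event_type_lower:
--         return 'theater'
--     if 'eten' in themes_lower or 'food' in themes_lower or 'culinair' in themes_lower:
--         return 'food'
--     if 'outdoor' in themes_lower or 'buiten' in themes_lower or 'natuur' in themes_lower:
--         return 'outdoor'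
--     if 'cultuur' in themes_lower or 'cultural' in event_type_lower:
--         return 'cultural'
--
--     return 'other'
-- ===== SOURCE B (Python) =====
-- # Inverted-index, two-phase approach: instead of testing rules in priority order with
-- # early return, phase 1 collects the set of ALL categories triggered by any pattern
-- # (via two keyword->category indexes), and phase 2 selects the highest-priority matched
-- # category. Correct because phase 2 scans categories in the same priority order A's
-- # if-chain uses, and a category is matched iff the corresponding branch test of A holds.
-- PRIORITY = ["festival", "concert", "sports", "market", "exhibition", "theater",
--             "food", "outdoor", "cultural"]
-- # substring pattern (tested against event_type_lower) -> category
-- ET_INDEX = {"festival": "festival", "concert": "concert", "sport": "sports",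
--             "markt": "market", "market": "market",
--             "tentoonstelling": "exhibition", "exhibition": "exhibition", "expo": "exhibition",
--             "theater": "theater", "theatre": "theater", "voorstelling": "theater",
--             "cultural": "cultural"}
-- # exact theme keyword (tested against themes_lower) -> category
-- THEME_INDEX = {"festival": "festival", "muziek": "concert", "music": "concert",
--                "sport": "sports", "eten": "food", "food": "food", "culinair": "food",
--                "outdoor": "outdoor", "buiten": "outdoor", "natuur": "outdoor",
--                "cultuur": "cultural"}
--
-- def map_event_category(event_type, themes):
--     etl = (event_type or "").lower()
--     themes_lower = [t.lower() for t in (themes or [])]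
--     # phase 1: exhaustively collect every matched category
--     matched = {cat for pat, cat in ET_INDEX.items() if pat in etl}
--     matched |= {cat for key, cat in THEME_INDEX.items() if key in themes_lower}
--     # phase 2: pick the matched category of highest priority
--     for cat in PRIORITY:
--         if cat in matched:
--             return cat
--     return "other"
-- ===== Notes on version B (the rewrite author's own statement) =====
-- stated objective: alternative
-- what changed: Replaced A's early-return if-chain with a two-phase inverted-index algorithm: two keyword-to-category dict indexes are scanned to build the set of ALL matched categories, then a separate pass over the priority list picks the highest-priority matched category.
import Mathlib
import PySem

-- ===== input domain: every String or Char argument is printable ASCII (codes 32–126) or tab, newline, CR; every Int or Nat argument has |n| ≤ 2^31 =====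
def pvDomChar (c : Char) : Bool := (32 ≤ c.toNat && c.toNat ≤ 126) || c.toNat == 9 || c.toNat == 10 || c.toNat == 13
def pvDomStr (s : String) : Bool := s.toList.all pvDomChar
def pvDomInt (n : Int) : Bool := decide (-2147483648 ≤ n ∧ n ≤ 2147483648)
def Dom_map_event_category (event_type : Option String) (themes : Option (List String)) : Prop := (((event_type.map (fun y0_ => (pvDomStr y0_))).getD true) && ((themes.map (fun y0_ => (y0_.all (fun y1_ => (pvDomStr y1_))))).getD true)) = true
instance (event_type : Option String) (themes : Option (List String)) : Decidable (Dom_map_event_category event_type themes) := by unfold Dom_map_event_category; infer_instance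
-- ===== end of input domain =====

-- B replaces A's early-return if-chain by a two-phase inverted-index algorithm: collect the set of all matched categories, then pick the highest-priority one (objective: alternative).

-- ===== PORT A =====
def map_event_category (event_type : Option String) (themes : Option (List String)) : String :=
  -- 'if not event_type: event_type = ""' : None and "" both become "" (exact: getD "" leaves "" as "")
  let event_type := event_type.getD ""
  let event_type_lower := PySem.Str.lower event_type
  let themes_lower := (themes.getD []).map PySem.Str.lower
  if PySem.Str.isIn "festival" event_type_lower || themes_lower.contains "festival" then "festival"
  else if PySem.Str.isIn "concert" event_type_lower || themes_lower.contains "muziek" || themes_lower.contains "music" then "concert"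
  else if PySem.Str.isIn "sport" event_type_lower || themes_lower.contains "sport" then "sports"
  else if PySem.Str.isIn "markt" event_type_lower || PySem.Str.isIn "market" event_type_lower then "market"
  else if PySem.Str.isIn "tentoonstelling" event_type_lower || PySem.Str.isIn "exhibition" event_type_lower || PySem.Str.isIn "expo" event_type_lower then "exhibition"
  else if PySem.Str.isIn "theater" event_type_lower || PySem.Str.isIn "theatre" event_type_lower || PySem.Str.isIn "voorstelling" event_type_lower then "theater"
  else if themes_lower.contains "eten" || themes_lower.contains "food" || themes_lower.contains "culinair" then "food"
  else if themes_lower.contains "outdoor" || themes_lower.contains "buiten" || themes_lower.contains "natuur" then "outdoor"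
  else if themes_lower.contains "cultuur" || PySem.Str.isIn "cultural" event_type_lower then "cultural"
  else "other"

-- ===== PORT B =====
def pvPriority : List String :=
  ["festival", "concert", "sports", "market", "exhibition", "theater", "food", "outdoor", "cultural"]

-- substring pattern (tested against event_type_lower) -> category
def pvEtIndex : List (String × String) :=
  [("festival", "festival"), ("concert", "concert"), ("sport", "sports"),
   ("markt", "market"), ("market", "market"),
   ("tentoonstelling", "exhibition"), ("exhibition", "exhibition"), ("expo", "exhibition"),
   ("theater", "theater"), ("theatre", "theater"), ("voorstelling", "theater"),
   ("cultural", "cultural")]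

-- exact theme keyword (tested against themes_lower) -> category
def pvThemeIndex : List (String × String) :=
  [("festival", "festival"), ("muziek", "concert"), ("music", "concert"),
   ("sport", "sports"), ("eten", "food"), ("food", "food"), ("culinair", "food"),
   ("outdoor", "outdoor"), ("buiten", "outdoor"), ("natuur", "outdoor"),
   ("cultuur", "cultural")]

-- phase 1 of Source B: the set of all matched categories
def pvMatched (etl : String) (themes_lower : List String) : PySem.Set String :=
  PySem.Set.union
    (PySem.Set.ofList ((pvEtIndex.filter (fun pc => PySem.Str.isIn pc.1 etl)).map Prod.snd))
    ((pvThemeIndex.filter (fun kc => themes_lower.contains kc.1)).map Prod.snd)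

-- phase 2 of Source B: 'for cat in PRIORITY: if cat in matched: return cat' as find? over pvPriority
def map_event_category_alt (event_type : Option String) (themes : Option (List String)) : String :=
  let etl := PySem.Str.lower (event_type.getD "")
  let themes_lower := (themes.getD []).map PySem.Str.lower
  let matched := pvMatched etl themes_lower
  match pvPriority.find? (fun cat => PySem.Set.contains matched cat) with
  | some cat => cat
  | none => "other"

-- ===== PRECONDITION & SPEC =====
def Spec_map_event_category (event_type : Option String) (themes : Option (List String)) (out : String) : Prop := out = map_event_category_alt event_type themes
instance (event_type : Option String) (themes : Option (List String)) (out : String) : Decidable (Spec_map_event_category event_type themes out) := by unfold Spec_map_event_category; infer_instance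

-- ===== CLAIM (what is proved, stated in full; the proofs are below) =====
def Claim_equal_map_event_category : Prop := ∀ (event_type : Option String) (themes : Option (List String)), Dom_map_event_category event_type themes → Spec_map_event_category event_type themes (map_event_category event_type themes)

-- ===== LEMMAS AND PROOFS =====

-- membership in B's matched set is a disjunction over the two index parts
lemma contains_matched (etl : String) (tl : List String) (c : String) :
    PySem.Set.contains (pvMatched etl tl) c =
      (((pvEtIndex.filter (fun pc => PySem.Str.isIn pc.1 etl)).map Prod.snd).contains c
      || ((pvThemeIndex.filter (fun kc => tl.contains kc.1)).map Prod.snd).contains c) := by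
  rw [Bool.eq_iff_iff]
  simp [pvMatched, PySem.Set.mem_union, PySem.Set.mem_ofList]

-- per category: membership in B's matched set is exactly A's branch test
lemma matched_festival (etl : String) (tl : List String) :
    PySem.Set.contains (pvMatched etl tl) "festival" = (PySem.Str.isIn "festival" etl || tl.contains "festival") := by
  rw [contains_matched, Bool.eq_iff_iff]
  simp [pvEtIndex, pvThemeIndex] <;> tauto

lemma matched_concert (etl : String) (tl : List String) :
    PySem.Set.contains (pvMatched etl tl) "concert" = (PySem.Str.isIn "concert" etl || tl.contains "muziek" || tl.contains "music") := by
  rw [contains_matched, Bool.eq_iff_iff]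
  simp [pvEtIndex, pvThemeIndex] <;> tauto

lemma matched_sports (etl : String) (tl : List String) :
    PySem.Set.contains (pvMatched etl tl) "sports" = (PySem.Str.isIn "sport" etl || tl.contains "sport") := by
  rw [contains_matched, Bool.eq_iff_iff]
  simp [pvEtIndex, pvThemeIndex] <;> tauto

lemma matched_market (etl : String) (tl : List String) :
    PySem.Set.contains (pvMatched etl tl) "market" = (PySem.Str.isIn "markt" etl || PySem.Str.isIn "market" etl) := by
  rw [contains_matched, Bool.eq_iff_iff]
  simp [pvEtIndex, pvThemeIndex] <;> tauto

lemma matched_exhibition (etl : String) (tl : List String) :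
    PySem.Set.contains (pvMatched etl tl) "exhibition" = (PySem.Str.isIn "tentoonstelling" etl || PySem.Str.isIn "exhibition" etl || PySem.Str.isIn "expo" etl) := by
  rw [contains_matched, Bool.eq_iff_iff]
  simp [pvEtIndex, pvThemeIndex] <;> tauto

lemma matched_theater (etl : String) (tl : List String) :
    PySem.Set.contains (pvMatched etl tl) "theater" = (PySem.Str.isIn "theater" etl || PySem.Str.isIn "theatre" etl || PySem.Str.isIn "voorstelling" etl) := by
  rw [contains_matched, Bool.eq_iff_iff]
  simp [pvEtIndex, pvThemeIndex] <;> tauto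

lemma matched_food (etl : String) (tl : List String) :
    PySem.Set.contains (pvMatched etl tl) "food" = (tl.contains "eten" || tl.contains "food" || tl.contains "culinair") := by
  rw [contains_matched, Bool.eq_iff_iff]
  simp [pvEtIndex, pvThemeIndex] <;> tauto

lemma matched_outdoor (etl : String) (tl : List String) :
    PySem.Set.contains (pvMatched etl tl) "outdoor" = (tl.contains "outdoor" || tl.contains "buiten" || tl.contains "natuur") := by
  rw [contains_matched, Bool.eq_iff_iff]
  simp [pvEtIndex, pvThemeIndex] <;> tauto

lemma matched_cultural (etl : String) (tl : List String) :
    PySem.Set.contains (pvMatched etl tl) "cultural" = (tl.contains "cultuur" || PySem.Str.isIn "cultural" etl) := by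
  rw [contains_matched, Bool.eq_iff_iff]
  simp [pvEtIndex, pvThemeIndex] <;> tauto

-- ===== VERDICT (by name: the statement is the Claim_ definition above) =====
theorem map_event_category_spec : Claim_equal_map_event_category := by
  intro event_type themes _
  unfold Spec_map_event_category map_event_category map_event_category_alt
  dsimp only
  simp only [pvPriority, List.find?, matched_festival, matched_concert, matched_sports,
    matched_market, matched_exhibition, matched_theater, matched_food, matched_outdoor,
    matched_cultural]
  split_ifs <;> simp_all only [Bool.not_eq_true]
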